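-- pv_equiv track=rewrite | github.com/samcho0608/Algorithms_Data_Structures | HackerRank Exercises/Data Structures/Stacks/game_of_two_stacks.py | twoStacks
-- ===== SOURCE A (Python) =====
-- def twoStacks(x, a, b):
--     la, lb = [a[0]],[b[0]]
--     del a[0]
--     del b[0]
--
--     while a or b:
--         if a:
--             la.append(a[0] + la[-1])
--             del a[0]
--         if b:
--             lb.append(b[0] + lb[-1])
--             del b[0]
--
--     max_count = 0
--     while la and lb:
--         if la[-1] > x:
--             la.pop()
--         if lb[-1] > x:
--             lb.pop()
--
--         if not la or not lb or la[-1] <= x and lb[-1] <= x: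
--             max_count = max(len(la), len(lb))
--             break
--
--     if bool(la) ^ bool(lb):
--         return max(len(la), len(lb))
--
--     while la and lb:
--         la.pop() if la[-1] > lb[-1] else lb.pop()
--         if len(la) + len(lb) <= max_count:
--             return max_count
--         if la[-1] + lb[-1] <= x:
--             return max(len(la) + len(lb), max_count)
-- ===== SOURCE B (Python) =====
-- from itertools import accumulate
--
-- def twoStacks(x, a, b):
--     # prefix sums built in one pass (no quadratic del a[0]); stacks replaced
--     # by index pointers i, j into the immutable prefix-sum lists
--     la = list(accumulate(a))
--     lb = list(accumulate(b))
--     i, j = len(la), len(lb)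
--
--     max_count = 0
--     while i and j:
--         if la[i - 1] > x:
--             i -= 1
--         if lb[j - 1] > x:
--             j -= 1
--         if not i or not j or la[i - 1] <= x and lb[j - 1] <= x:
--             max_count = max(i, j)
--             break
--
--     if (i > 0) ^ (j > 0):
--         return max(i, j)
--
--     while i and j:
--         if la[i - 1] > lb[j - 1]:
--             i -= 1
--         else:
--             j -= 1
--         if i + j <= max_count:
--             return max_count
--         if la[i - 1] + lb[j - 1] <= x:
--             return max(i + j, max_count)
-- ===== Notes on version B (the rewrite author's own statement) =====
-- stated objective: faster
-- what changed: B builds the prefix sums in one pass with itertools.accumulate instead of A's repeated `del a[0]` (O(n) each), and replaces A's destructive list pops by two integer index pointers into the immutable prefix-sum lists, keeping the identical pop/break logic.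
import Mathlib
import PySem

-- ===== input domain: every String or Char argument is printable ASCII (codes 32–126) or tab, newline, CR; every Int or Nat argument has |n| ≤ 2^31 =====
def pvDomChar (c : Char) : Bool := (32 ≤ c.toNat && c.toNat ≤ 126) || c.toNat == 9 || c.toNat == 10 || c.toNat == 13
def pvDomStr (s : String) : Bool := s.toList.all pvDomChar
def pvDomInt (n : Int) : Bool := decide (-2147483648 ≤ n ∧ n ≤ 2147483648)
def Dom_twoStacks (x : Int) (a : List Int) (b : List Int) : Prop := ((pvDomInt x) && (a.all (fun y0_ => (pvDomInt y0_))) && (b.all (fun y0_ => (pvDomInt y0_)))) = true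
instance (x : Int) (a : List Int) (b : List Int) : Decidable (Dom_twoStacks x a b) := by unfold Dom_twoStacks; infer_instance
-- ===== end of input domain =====

-- B replaces A's quadratic `del a[0]` prefix building and list pops by one-pass
-- prefix sums with index pointers (same pop logic, same results).
-- NOTE: Python A empties its list arguments `a` and `b` in place; B does not
-- mutate them — the equivalence proved here is about the RETURN value only.

-- ===== PORT A =====
-- la/lb are kept head-first (head = Python la[-1], i.e. the stack top).
-- the `while a or b` loop building the running sums
def paPhase1 (a b la lb : List Int) : List Int × List Int :=
  match a, b with
  | [], [] => (la, lb)
  | a0 :: a', [] => paPhase1 a' [] ((a0 + la.headD 0) :: la) lb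
  | [], b0 :: b' => paPhase1 [] b' la ((b0 + lb.headD 0) :: lb)
  | a0 :: a', b0 :: b' =>
      paPhase1 a' b' ((a0 + la.headD 0) :: la) ((b0 + lb.headD 0) :: lb)
termination_by a.length + b.length

-- the `while la and lb` trimming loop; fuel only makes the recursion total
def paPhase2 (x : Int) : Nat → List Int → List Int → List Int × List Int × Int
  | 0, la, lb => (la, lb, 0)
  | fuel + 1, la, lb =>
    if la = [] ∨ lb = [] then (la, lb, 0)
    else
      let la' := if la.headD 0 > x then la.tail else la
      let lb' := if lb.headD 0 > x then lb.tail else lb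
      if la' = [] ∨ lb' = [] ∨ (la'.headD 0 ≤ x ∧ lb'.headD 0 ≤ x) then
        (la', lb', (max la'.length lb'.length : Nat))
      else paPhase2 x fuel la' lb'

-- the final `while la and lb` loop; fuel only makes the recursion total
def paPhase3 (x mc : Int) : Nat → List Int → List Int → Option Int
  | 0, _, _ => none
  | fuel + 1, la, lb =>
    if la = [] ∨ lb = [] then none
    else
      let s := if la.headD 0 > lb.headD 0 then (la.tail, lb) else (la, lb.tail)
      let la' := s.1
      let lb' := s.2
      if (la'.length + lb'.length : Int) ≤ mc then some mc
      else if la'.headD 0 + lb'.headD 0 ≤ x then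
        some (max (la'.length + lb'.length : Nat) mc)
      else paPhase3 x mc fuel la' lb'

def twoStacks (x : Int) (a : List Int) (b : List Int) : Option Int :=
  match a, b with
  | a0 :: a', b0 :: b' =>
    let p := paPhase1 a' b' [a0] [b0]
    let q := paPhase2 x (p.1.length + p.2.length + 1) p.1 p.2
    let la := q.1
    let lb := q.2.1
    let mc := q.2.2
    if (decide (la ≠ [])).xor (decide (lb ≠ [])) then
      some (max la.length lb.length : Nat)
    else
      paPhase3 x mc (la.length + lb.length + 1) la lb
  | _, _ => none  -- Python raises IndexError (a[0]/b[0] on an empty list)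

-- ===== PORT B =====
-- i, j are index pointers: the live prefixes are L[:i], M[:j]
def pbPhase2 (x : Int) (L M : List Int) : Nat → Nat → Nat → Nat × Nat × Int
  | 0, i, j => (i, j, 0)
  | fuel + 1, i, j =>
    if i = 0 ∨ j = 0 then (i, j, 0)
    else
      let i' := if L.getD (i - 1) 0 > x then i - 1 else i
      let j' := if M.getD (j - 1) 0 > x then j - 1 else j
      if i' = 0 ∨ j' = 0 ∨ (L.getD (i' - 1) 0 ≤ x ∧ M.getD (j' - 1) 0 ≤ x) then
        (i', j', (max i' j' : Nat))
      else pbPhase2 x L M fuel i' j'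

def pbPhase3 (x mc : Int) (L M : List Int) : Nat → Nat → Nat → Option Int
  | 0, _, _ => none
  | fuel + 1, i, j =>
    if i = 0 ∨ j = 0 then none
    else
      let s := if L.getD (i - 1) 0 > M.getD (j - 1) 0 then (i - 1, j) else (i, j - 1)
      let i' := s.1
      let j' := s.2
      if (i' + j' : Int) ≤ mc then some mc
      else if L.getD (i' - 1) 0 + M.getD (j' - 1) 0 ≤ x then
        some (max (i' + j') mc : Int)
      else pbPhase3 x mc L M fuel i' j'

def twoStacks_alt (x : Int) (a : List Int) (b : List Int) : Option Int :=
  let L := (a.scanl (· + ·) 0).tail      -- itertools.accumulate(a)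
  let M := (b.scanl (· + ·) 0).tail
  let r := pbPhase2 x L M (L.length + M.length + 1) L.length M.length
  let i := r.1
  let j := r.2.1
  let mc := r.2.2
  if (decide (0 < i)).xor (decide (0 < j)) then some (max i j : Nat)
  else pbPhase3 x mc L M (i + j + 1) i j

-- ===== PRECONDITION & SPEC =====
-- Pre_ excludes exactly empty a or empty b, where A raises IndexError on a[0]/b[0]
def Pre_twoStacks (x : Int) (a : List Int) (b : List Int) : Prop := a ≠ [] ∧ b ≠ []
instance (x : Int) (a : List Int) (b : List Int) : Decidable (Pre_twoStacks x a b) := by unfold Pre_twoStacks; infer_instance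
def pvWitness_twoStacks : Int × List Int × List Int := (10, [4, 2, 4, 6, 1], [2, 1, 8, 5])

def Spec_twoStacks (x : Int) (a : List Int) (b : List Int) (out : Option Int) : Prop := out = twoStacks_alt x a b
instance (x : Int) (a : List Int) (b : List Int) (out : Option Int) : Decidable (Spec_twoStacks x a b out) := by unfold Spec_twoStacks; infer_instance

-- ===== CLAIM (what is proved, stated in full; the proofs are below) =====
def Claim_equal_twoStacks : Prop := ∀ (x : Int) (a : List Int) (b : List Int), Dom_twoStacks x a b → Pre_twoStacks x a b → Spec_twoStacks x a b (twoStacks x a b)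

-- ===== LEMMAS AND PROOFS =====
-- take/reverse representation lemmas
theorem trNil {L : List Int} {i : Nat} (h : i ≤ L.length) :
    ((L.take i).reverse = []) ↔ i = 0 := by
  rw [List.reverse_eq_nil_iff]
  constructor
  · intro h2
    have h3 : (L.take i).length = 0 := by rw [h2]; rfl
    rw [List.length_take] at h3
    omega
  · intro h2; simp [h2]

theorem trLen {L : List Int} {i : Nat} (h : i ≤ L.length) :
    ((L.take i).reverse).length = i := by
  simp [List.length_take]; omega

theorem takeSucc {L : List Int} {k : Nat} (h : k < L.length) :
    L.take (k + 1) = L.take k ++ [L.getD k 0] := by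
  rw [List.take_add_one]
  simp [List.getElem?_eq_getElem h, List.getD_eq_getElem?_getD]

theorem trHead {L : List Int} {i : Nat} (h0 : 0 < i) (h : i ≤ L.length) :
    ((L.take i).reverse).headD 0 = L.getD (i - 1) 0 := by
  obtain ⟨k, rfl⟩ : ∃ k, i = k + 1 := ⟨i - 1, by omega⟩
  rw [takeSucc (by omega)]
  simp

theorem trTail {L : List Int} {i : Nat} (h0 : 0 < i) (h : i ≤ L.length) :
    ((L.take i).reverse).tail = (L.take (i - 1)).reverse := by
  obtain ⟨k, rfl⟩ : ∃ k, i = k + 1 := ⟨i - 1, by omega⟩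
  rw [takeSucc (by omega)]
  simp

theorem scanlHead (s : Int) (l : List Int) :
    List.scanl (· + ·) s l = s :: (List.scanl (· + ·) s l).tail := by
  cases l <;> simp [List.scanl_nil, List.scanl_cons]

theorem phase1Eq : ∀ (a b la lb : List Int),
    paPhase1 a b la lb =
      ((a.scanl (· + ·) (la.headD 0)).tail.reverse ++ la,
       (b.scanl (· + ·) (lb.headD 0)).tail.reverse ++ lb) := by
  intro a
  induction a with
  | nil =>
    intro b
    induction b with
    | nil => intro la lb; simp [paPhase1, List.scanl]
    | cons b0 b' ihb =>
      intro la lb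
      rw [paPhase1, ihb]
      simp only [List.scanl_cons, List.headD_cons, List.tail_cons]
      rw [scanlHead (lb.headD 0 + b0) b']
      simp [add_comm]
  | cons a0 a' iha =>
    intro b la lb
    cases b with
    | nil =>
      rw [paPhase1, iha]
      simp only [List.scanl_cons, List.headD_cons, List.tail_cons]
      rw [scanlHead (la.headD 0 + a0) a']
      simp [add_comm]
    | cons b0 b' =>
      rw [paPhase1, iha]
      simp only [List.scanl_cons, List.headD_cons, List.tail_cons]
      rw [scanlHead (la.headD 0 + a0) a', scanlHead (lb.headD 0 + b0) b']
      simp [add_comm]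

theorem phase2Sync (x : Int) (L M : List Int) :
    ∀ (f i j : Nat), i ≤ L.length → j ≤ M.length → i + j + 1 ≤ f →
    paPhase2 x f ((L.take i).reverse) ((M.take j).reverse)
      = ((L.take (pbPhase2 x L M f i j).1).reverse,
         (M.take (pbPhase2 x L M f i j).2.1).reverse,
         (pbPhase2 x L M f i j).2.2)
    ∧ (pbPhase2 x L M f i j).1 ≤ i ∧ (pbPhase2 x L M f i j).2.1 ≤ j
    ∧ ((pbPhase2 x L M f i j).1 = 0 ∨ (pbPhase2 x L M f i j).2.1 = 0
       ∨ (((pbPhase2 x L M f i j).1 : Int) ≤ (pbPhase2 x L M f i j).2.2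
          ∧ ((pbPhase2 x L M f i j).2.1 : Int) ≤ (pbPhase2 x L M f i j).2.2)) := by
  intro f
  induction f with
  | zero => intro i j _ _ hf; omega
  | succ f ih =>
    intro i j hi hj hf
    by_cases hij : i = 0 ∨ j = 0
    · have hA : (L.take i).reverse = [] ∨ (M.take j).reverse = [] := by
        rcases hij with h | h
        · left; exact (trNil hi).mpr h
        · right; exact (trNil hj).mpr h
      rw [paPhase2, pbPhase2, if_pos hA, if_pos hij]
      exact ⟨rfl, le_refl _, le_refl _, by tauto⟩
    · rw [not_or] at hij
      have hi0 : 0 < i := Nat.pos_of_ne_zero hij.1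
      have hj0 : 0 < j := Nat.pos_of_ne_zero hij.2
      have hA : ¬((L.take i).reverse = [] ∨ (M.take j).reverse = []) := by
        rw [trNil hi, trNil hj]; tauto
      rw [paPhase2, pbPhase2, if_neg hA, if_neg (by tauto : ¬(i = 0 ∨ j = 0))]
      simp only
      have hla' : (if (L.take i).reverse.headD 0 > x then (L.take i).reverse.tail
                   else (L.take i).reverse)
          = (L.take (if L.getD (i - 1) 0 > x then i - 1 else i)).reverse := by
        rw [trHead hi0 hi]
        split
        · exact trTail hi0 hi
        · rfl
      have hlb' : (if (M.take j).reverse.headD 0 > x then (M.take j).reverse.tail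
                   else (M.take j).reverse)
          = (M.take (if M.getD (j - 1) 0 > x then j - 1 else j)).reverse := by
        rw [trHead hj0 hj]
        split
        · exact trTail hj0 hj
        · rfl
      rw [hla', hlb']
      set i' := if L.getD (i - 1) 0 > x then i - 1 else i with hi'def
      set j' := if M.getD (j - 1) 0 > x then j - 1 else j with hj'def
      have hi'le : i' ≤ i := by rw [hi'def]; split <;> omega
      have hj'le : j' ≤ j := by rw [hj'def]; split <;> omega
      have hi'L : i' ≤ L.length := le_trans hi'le hi
      have hj'M : j' ≤ M.length := le_trans hj'le hj
      have hcond : ((L.take i').reverse = [] ∨ (M.take j').reverse = [] ∨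
            ((L.take i').reverse.headD 0 ≤ x ∧ (M.take j').reverse.headD 0 ≤ x))
          ↔ (i' = 0 ∨ j' = 0 ∨ (L.getD (i' - 1) 0 ≤ x ∧ M.getD (j' - 1) 0 ≤ x)) := by
        rw [trNil hi'L, trNil hj'M]
        by_cases h1 : i' = 0
        · tauto
        · by_cases h2 : j' = 0
          · tauto
          · rw [trHead (Nat.pos_of_ne_zero h1) hi'L, trHead (Nat.pos_of_ne_zero h2) hj'M]
      by_cases hbr : i' = 0 ∨ j' = 0 ∨ (L.getD (i' - 1) 0 ≤ x ∧ M.getD (j' - 1) 0 ≤ x)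
      · rw [if_pos (hcond.mpr hbr), if_pos hbr]
        refine ⟨by rw [trLen hi'L, trLen hj'M], by simpa using hi'le, by simpa using hj'le, ?_⟩
        simp only
        rcases hbr with h | h | h
        · tauto
        · tauto
        · right; right
          constructor <;> · push_cast; omega
      · rw [if_neg ((not_congr hcond).mpr hbr), if_neg hbr]
        have hstep : i' + j' < i + j := by
          by_cases h1 : L.getD (i - 1) 0 > x
          · have : i' = i - 1 := by rw [hi'def, if_pos h1]
            omega
          · by_cases h2 : M.getD (j - 1) 0 > x
            · have : j' = j - 1 := by rw [hj'def, if_pos h2]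
              omega
            · exfalso
              apply hbr
              right; right
              have e1 : i' = i := by rw [hi'def, if_neg h1]
              have e2 : j' = j := by rw [hj'def, if_neg h2]
              rw [e1, e2]
              exact ⟨le_of_not_gt h1, le_of_not_gt h2⟩
        obtain ⟨h1, h2, h3, h4⟩ := ih i' j' hi'L hj'M (by omega)
        exact ⟨h1, le_trans h2 hi'le, le_trans h3 hj'le, h4⟩

theorem phase3Sync (x mc : Int) (L M : List Int) :
    ∀ (f i j : Nat), i ≤ L.length → j ≤ M.length →
    (i = 0 ∨ j = 0 ∨ ((i : Int) ≤ mc ∧ (j : Int) ≤ mc)) →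
    paPhase3 x mc f ((L.take i).reverse) ((M.take j).reverse) = pbPhase3 x mc L M f i j := by
  intro f
  induction f with
  | zero => intro i j _ _ _; rfl
  | succ f ih =>
    intro i j hi hj hmc
    by_cases hij : i = 0 ∨ j = 0
    · have hA : (L.take i).reverse = [] ∨ (M.take j).reverse = [] := by
        rcases hij with h | h
        · left; exact (trNil hi).mpr h
        · right; exact (trNil hj).mpr h
      rw [paPhase3, pbPhase3, if_pos hA, if_pos hij]
    · rw [not_or] at hij
      have hi0 : 0 < i := Nat.pos_of_ne_zero hij.1
      have hj0 : 0 < j := Nat.pos_of_ne_zero hij.2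
      have hmc2 : (i : Int) ≤ mc ∧ (j : Int) ≤ mc := by
        rcases hmc with h | h | h
        · omega
        · omega
        · exact h
      have hA : ¬((L.take i).reverse = [] ∨ (M.take j).reverse = []) := by
        rw [trNil hi, trNil hj]; tauto
      rw [paPhase3, pbPhase3, if_neg hA, if_neg (by tauto : ¬(i = 0 ∨ j = 0))]
      simp only
      have hs : (if (L.take i).reverse.headD 0 > (M.take j).reverse.headD 0
                  then ((L.take i).reverse.tail, (M.take j).reverse)
                  else ((L.take i).reverse, (M.take j).reverse.tail))
          = ((L.take (if L.getD (i - 1) 0 > M.getD (j - 1) 0 then i - 1 else i)).reverse,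
             (M.take (if L.getD (i - 1) 0 > M.getD (j - 1) 0 then j else j - 1)).reverse) := by
        rw [trHead hi0 hi, trHead hj0 hj]
        split
        · rw [trTail hi0 hi]
        · rw [trTail hj0 hj]
      rw [hs]
      set i' := if L.getD (i - 1) 0 > M.getD (j - 1) 0 then i - 1 else i with hi'def
      set j' := if L.getD (i - 1) 0 > M.getD (j - 1) 0 then j else j - 1 with hj'def
      have hii : (i' = i - 1 ∧ j' = j) ∨ (i' = i ∧ j' = j - 1) := by
        rw [hi'def, hj'def]; split
        · left; exact ⟨rfl, rfl⟩
        · right; exact ⟨rfl, rfl⟩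
      have hi'le : i' ≤ i := by omega
      have hj'le : j' ≤ j := by omega
      have hi'L : i' ≤ L.length := le_trans hi'le hi
      have hj'M : j' ≤ M.length := le_trans hj'le hj
      have hp1 : (if L.getD (i - 1) 0 > M.getD (j - 1) 0 then (i - 1, j) else (i, j - 1)).1 = i' := by
        by_cases h : L.getD (i - 1) 0 > M.getD (j - 1) 0
        · rw [if_pos h, hi'def, if_pos h]
        · rw [if_neg h, hi'def, if_neg h]
      have hp2 : (if L.getD (i - 1) 0 > M.getD (j - 1) 0 then (i - 1, j) else (i, j - 1)).2 = j' := by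
        by_cases h : L.getD (i - 1) 0 > M.getD (j - 1) 0
        · rw [if_pos h, hj'def, if_pos h]
        · rw [if_neg h, hj'def, if_neg h]
      rw [hp1, hp2]
      simp only
      rw [trLen hi'L, trLen hj'M]
      by_cases hret : ((i' : Int) + (j' : Int) ≤ mc)
      · rw [if_pos hret, if_pos hret]
      · rw [if_neg hret, if_neg hret]
        have hi'0 : 0 < i' := by
          rcases hii with ⟨e1, e2⟩ | ⟨e1, e2⟩ <;> omega
        have hj'0 : 0 < j' := by
          rcases hii with ⟨e1, e2⟩ | ⟨e1, e2⟩ <;> omega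
        rw [trHead hi'0 hi'L, trHead hj'0 hj'M]
        by_cases hret2 : L.getD (i' - 1) 0 + M.getD (j' - 1) 0 ≤ x
        · rw [if_pos hret2, if_pos hret2, Nat.cast_add]
        · rw [if_neg hret2, if_neg hret2]
          exact ih i' j' hi'L hj'M (by right; right; constructor <;> omega)

theorem revEq (s : Int) (l : List Int) :
    (List.scanl (· + ·) s l).tail.reverse ++ [s]
      = ((List.scanl (· + ·) s l).take (List.scanl (· + ·) s l).length).reverse := by
  rw [List.take_length]
  conv_rhs => rw [scanlHead s l]
  rw [List.reverse_cons]


-- ===== VERDICT (by name: the statement is the Claim_ definition above) =====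
theorem twoStacks_spec : Claim_equal_twoStacks := by
  intro x a b _ hpre
  obtain ⟨ha, hb⟩ := hpre
  cases a with
  | nil => exact absurd rfl ha
  | cons a0 a' =>
    cases b with
    | nil => exact absurd rfl hb
    | cons b0 b' =>
      show twoStacks x (a0 :: a') (b0 :: b') = twoStacks_alt x (a0 :: a') (b0 :: b')
      rw [twoStacks, twoStacks_alt]
      simp only [phase1Eq, List.headD_cons, List.scanl_cons, List.tail_cons, zero_add]
      rw [revEq a0 a', revEq b0 b']
      set L := List.scanl (· + ·) a0 a' with hL
      set M := List.scanl (· + ·) b0 b' with hM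
      simp only [List.length_reverse, List.length_take, min_self]
      obtain ⟨h1, h2, h3, h4⟩ :=
        phase2Sync x L M (L.length + M.length + 1) L.length M.length le_rfl le_rfl le_rfl
      rw [h1]
      simp only
      set r := pbPhase2 x L M (L.length + M.length + 1) L.length M.length with hr
      have e1 : ((L.take r.1).reverse ≠ []) ↔ (0 < r.1) := by
        rw [ne_eq, trNil h2]; omega
      have e2 : ((M.take r.2.1).reverse ≠ []) ↔ (0 < r.2.1) := by
        rw [ne_eq, trNil h3]; omega
      simp only [e1, e2, trLen h2, trLen h3]
      split
      · rfl
      · exact phase3Sync x r.2.2 L M (r.1 + r.2.1 + 1) r.1 r.2.1 h2 h3 h4
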